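-- pv_equiv track=rewrite | github.com/shubhampawar224-source/research-assessment | backend/helper/process_help.py | find_section_pages
-- ===== SOURCE A (Python) =====
-- from typing import List, Dict
--
-- def find_section_pages(section_text: str, page_texts: List[tuple]) -> tuple[int, int]:
--     """Find the start and end page numbers for a section"""
--     # Get first 200 characters of section to search for
--     search_text = section_text[:200].strip()
--
--     start_page = None
--     end_page = None
--
--     for page_num, page_text in page_texts:
--         if search_text in page_text:
--             if start_page is None:
--                 start_page = page_num
--             end_page = page_num
--
--     return start_page or 1, end_page or 1
-- ===== SOURCE B (Python) =====
-- def find_section_pages(section_text, page_texts):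
--     """Find the start and end page numbers for a section"""
--     search_text = section_text[:200].strip()
--     start_page = next((n for n, t in page_texts if search_text in t), None)
--     end_page = next((n for n, t in reversed(page_texts) if search_text in t), None)
--     return start_page or 1, end_page or 1
-- ===== Notes on version B (the rewrite author's own statement) =====
-- stated objective: alternative
-- what changed: Replaces the single full pass that threads two Option accumulators with two independent early-stopping scans: a forward scan returning the first matching page and a backward scan over the reversed list returning the last.
import Mathlib
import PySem

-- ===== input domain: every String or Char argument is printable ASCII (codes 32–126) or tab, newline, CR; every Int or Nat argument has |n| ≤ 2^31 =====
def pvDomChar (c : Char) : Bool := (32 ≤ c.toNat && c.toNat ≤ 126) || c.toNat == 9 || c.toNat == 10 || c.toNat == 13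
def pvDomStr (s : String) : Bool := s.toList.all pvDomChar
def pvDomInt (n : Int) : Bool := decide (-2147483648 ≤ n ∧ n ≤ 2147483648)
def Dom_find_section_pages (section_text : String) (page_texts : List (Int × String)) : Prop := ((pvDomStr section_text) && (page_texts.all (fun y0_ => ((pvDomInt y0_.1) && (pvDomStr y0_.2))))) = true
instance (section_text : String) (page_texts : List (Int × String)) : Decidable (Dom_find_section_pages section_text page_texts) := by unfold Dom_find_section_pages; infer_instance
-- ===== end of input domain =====

-- B replaces A's single full pass with two independent early-stopping scans (forward for the
-- first match, backward for the last); same return value everywhere, similar cost (alternative).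

-- ===== PORT A =====
-- single pass tracking (start_page, end_page) as Options; 'x or 1' maps none and 0 to 1
def find_section_pages (section_text : String) (page_texts : List (Int × String)) : Int × Int :=
  let search_text := PySem.Str.strip (PySem.Str.slice section_text none (some 200))
  let st := page_texts.foldl
    (fun (st : Option Int × Option Int) p =>
      if PySem.Str.isIn search_text p.2 then
        (if st.1 = none then some p.1 else st.1, some p.1)
      else st)
    (none, none)
  ((match st.1 with | none => 1 | some n => if n = 0 then 1 else n),
   (match st.2 with | none => 1 | some n => if n = 0 then 1 else n))

-- ===== PORT B =====
-- next((n for n, t in pts if search in t), None): forward scan with early exit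
def pvFirstHit (search : String) : List (Int × String) → Option Int
  | [] => none
  | p :: rest => if PySem.Str.isIn search p.2 then some p.1 else pvFirstHit search rest

def find_section_pages_alt (section_text : String) (page_texts : List (Int × String)) : Int × Int :=
  let search_text := PySem.Str.strip (PySem.Str.slice section_text none (some 200))
  let start_page := pvFirstHit search_text page_texts
  let end_page := pvFirstHit search_text page_texts.reverse
  ((match start_page with | none => 1 | some n => if n = 0 then 1 else n),
   (match end_page with | none => 1 | some n => if n = 0 then 1 else n))

-- ===== PRECONDITION & SPEC =====
def Spec_find_section_pages (section_text : String) (page_texts : List (Int × String)) (out : Int × Int) : Prop := out = find_section_pages_alt section_text page_texts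
instance (section_text : String) (page_texts : List (Int × String)) (out : Int × Int) : Decidable (Spec_find_section_pages section_text page_texts out) := by unfold Spec_find_section_pages; infer_instance

-- ===== CLAIM (what is proved, stated in full; the proofs are below) =====
def Claim_equal_find_section_pages : Prop := ∀ (section_text : String) (page_texts : List (Int × String)), Dom_find_section_pages section_text page_texts → Spec_find_section_pages section_text page_texts (find_section_pages section_text page_texts)

-- ===== LEMMAS AND PROOFS =====

-- first hit of an abstract predicate (proof helper)
def pvFH (c : Int × String → Bool) : List (Int × String) → Option Int
  | [] => none
  | p :: rest => if c p then some p.1 else pvFH c rest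

theorem pvFirstHit_eq_pvFH (search : String) (l : List (Int × String)) :
    pvFirstHit search l = pvFH (fun p => PySem.Str.isIn search p.2) l := by
  induction l with
  | nil => rfl
  | cons p rest ih => simp only [pvFirstHit, pvFH, ih]

theorem pvFH_append (c : Int × String → Bool) (xs ys : List (Int × String)) :
    pvFH c (xs ++ ys) =
      (match pvFH c xs with | some n => some n | none => pvFH c ys) := by
  induction xs with
  | nil => simp [pvFH]
  | cons p rest ih =>
    simp only [List.cons_append, pvFH]
    split_ifs <;> simp [ih]

theorem fold_fst (c : Int × String → Bool) (l : List (Int × String)) (a b : Option Int) :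
    (l.foldl
      (fun (st : Option Int × Option Int) p =>
        if c p then (if st.1 = none then some p.1 else st.1, some p.1) else st) (a, b)).1 =
    (match a with | some x => some x | none => pvFH c l) := by
  induction l generalizing a b with
  | nil => cases a <;> rfl
  | cons p rest ih =>
    simp only [List.foldl_cons]
    by_cases h : c p = true
    · cases a <;> simp [h, ih, pvFH]
    · cases a <;> simp [h, ih, pvFH]

theorem fold_snd (c : Int × String → Bool) (l : List (Int × String)) (a b : Option Int) :
    (l.foldl
      (fun (st : Option Int × Option Int) p =>
        if c p then (if st.1 = none then some p.1 else st.1, some p.1) else st) (a, b)).2 =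
    (match pvFH c l.reverse with | some n => some n | none => b) := by
  induction l generalizing a b with
  | nil => simp [pvFH]
  | cons p rest ih =>
    simp only [List.foldl_cons, List.reverse_cons, pvFH_append]
    by_cases h : c p = true
    · simp only [h, if_true, ih]
      cases pvFH c rest.reverse <;> simp [pvFH, h]
    · simp only [h, ih]
      cases pvFH c rest.reverse <;> simp [pvFH, h]

-- ===== VERDICT (by name: the statement is the Claim_ definition above) =====
theorem find_section_pages_spec : Claim_equal_find_section_pages := by
  intro section_text page_texts _
  unfold Spec_find_section_pages find_section_pages find_section_pages_alt
  simp only [fold_fst, fold_snd, pvFirstHit_eq_pvFH]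
  cases pvFH (fun p => PySem.Str.isIn (PySem.Str.strip (PySem.Str.slice section_text none (some 200))) p.2) page_texts.reverse <;> rfl
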